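-- pv_equiv track=rewrite | github.com/SoftWriters/CashRegister | src/register/cash_register.py | sum_final_change
-- ===== SOURCE A (Python) =====
-- def sum_final_change(final_change, DENOMINATIONS_):
--     for denomination in final_change:
--         if denomination == 'dollar':
--             DENOMINATIONS_['dollar'] += 1
--         elif denomination == 'quarter':
--             DENOMINATIONS_['quarter'] += 1
--         elif denomination == 'dime':
--             DENOMINATIONS_['dime'] += 1
--         elif denomination == 'nickel':
--             DENOMINATIONS_['nickel'] += 1
--         else:
--             DENOMINATIONS_['penny'] += 1
--     return DENOMINATIONS_
-- ===== SOURCE B (Python) =====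
-- def sum_final_change(final_change, DENOMINATIONS_):
--     counts = {}
--     for e in final_change:
--         counts[e] = counts.get(e, 0) + 1
--     cd = counts.get('dollar', 0)
--     cq = counts.get('quarter', 0)
--     ci = counts.get('dime', 0)
--     cn = counts.get('nickel', 0)
--     if cd:
--         DENOMINATIONS_['dollar'] += cd
--     if cq:
--         DENOMINATIONS_['quarter'] += cq
--     if ci:
--         DENOMINATIONS_['dime'] += ci
--     if cn:
--         DENOMINATIONS_['nickel'] += cn
--     extra = len(final_change) - cd - cq - ci - cn
--     if extra:
--         DENOMINATIONS_['penny'] += extra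
--     return DENOMINATIONS_
-- ===== Notes on version B (the rewrite author's own statement) =====
-- stated objective: alternative
-- what changed: A dispatches each element through an if/elif chain and increments the dict once per element; B builds a frequency table of final_change in one pass, then applies at most five batched guarded updates (one per known denomination plus a penny remainder computed arithmetically from the length).
import Mathlib
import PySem

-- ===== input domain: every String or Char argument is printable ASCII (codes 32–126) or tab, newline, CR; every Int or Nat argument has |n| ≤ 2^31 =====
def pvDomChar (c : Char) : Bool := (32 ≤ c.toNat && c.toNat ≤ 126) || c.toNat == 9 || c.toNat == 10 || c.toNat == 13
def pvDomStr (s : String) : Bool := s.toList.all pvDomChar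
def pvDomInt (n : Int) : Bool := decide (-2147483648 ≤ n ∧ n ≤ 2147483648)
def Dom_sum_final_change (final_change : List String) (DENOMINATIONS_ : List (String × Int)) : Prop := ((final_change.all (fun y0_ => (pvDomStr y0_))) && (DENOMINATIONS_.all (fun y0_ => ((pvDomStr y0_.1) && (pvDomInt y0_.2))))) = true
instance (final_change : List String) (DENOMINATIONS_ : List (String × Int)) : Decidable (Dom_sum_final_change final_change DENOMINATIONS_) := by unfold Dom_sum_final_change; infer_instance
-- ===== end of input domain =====

-- B replaces A's per-element dispatch loop by one frequency-table pass plus five batched guarded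
-- updates (objective: alternative/idiomatic). Both Pythons mutate DENOMINATIONS_ in place the same
-- way; the equivalence proved here is about the returned mapping.

-- ===== PORT A =====
-- `DENOMINATIONS_[k] += n` ported as pvBump: exact when the key k is present (Pre_ guarantees it
-- for every key the programs touch); on a missing key Python raises KeyError, excluded by Pre_.
def pvBump (d : List (String × Int)) (k : String) (n : Int) : List (String × Int) :=
  d.map (fun p => if p.1 = k then (p.1, p.2 + n) else p)

-- the body of A's for-loop (the if/elif chain), factored as a named helper
def pvStepA (d : List (String × Int)) (denomination : String) : List (String × Int) :=
  if denomination = "dollar" then pvBump d "dollar" 1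
  else if denomination = "quarter" then pvBump d "quarter" 1
  else if denomination = "dime" then pvBump d "dime" 1
  else if denomination = "nickel" then pvBump d "nickel" 1
  else pvBump d "penny" 1

def sum_final_change (final_change : List String) (DENOMINATIONS_ : List (String × Int)) : List (String × Int) :=
  final_change.foldl pvStepA DENOMINATIONS_

-- ===== PORT B =====
def sum_final_change_alt (final_change : List String) (DENOMINATIONS_ : List (String × Int)) : List (String × Int) :=
  let counts := final_change.foldl (fun d e => d.insert e (d.getD e 0 + 1)) PySem.Dict.empty
  let cd := counts.getD "dollar" 0
  let cq := counts.getD "quarter" 0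
  let ci := counts.getD "dime" 0
  let cn := counts.getD "nickel" 0
  let d1 := if cd ≠ 0 then pvBump DENOMINATIONS_ "dollar" cd else DENOMINATIONS_
  let d2 := if cq ≠ 0 then pvBump d1 "quarter" cq else d1
  let d3 := if ci ≠ 0 then pvBump d2 "dime" ci else d2
  let d4 := if cn ≠ 0 then pvBump d3 "nickel" cn else d3
  let extra := (final_change.length : Int) - cd - cq - ci - cn
  if extra ≠ 0 then pvBump d4 "penny" extra else d4

-- ===== PRECONDITION & SPEC =====
-- Pre_ excludes exactly the inputs on which Python A raises KeyError: some touched bucket key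
-- ('dollar'/'quarter'/'dime'/'nickel' occurring in final_change, or 'penny' when any other
-- element occurs) is absent from DENOMINATIONS_.
def Pre_sum_final_change (final_change : List String) (DENOMINATIONS_ : List (String × Int)) : Prop :=
  ("dollar" ∈ final_change → "dollar" ∈ DENOMINATIONS_.map Prod.fst) ∧
  ("quarter" ∈ final_change → "quarter" ∈ DENOMINATIONS_.map Prod.fst) ∧
  ("dime" ∈ final_change → "dime" ∈ DENOMINATIONS_.map Prod.fst) ∧
  ("nickel" ∈ final_change → "nickel" ∈ DENOMINATIONS_.map Prod.fst) ∧
  ((∃ e ∈ final_change, e ≠ "dollar" ∧ e ≠ "quarter" ∧ e ≠ "dime" ∧ e ≠ "nickel") →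
    "penny" ∈ DENOMINATIONS_.map Prod.fst)

instance (final_change : List String) (DENOMINATIONS_ : List (String × Int)) : Decidable (Pre_sum_final_change final_change DENOMINATIONS_) := by
  unfold Pre_sum_final_change; infer_instance

def pvWitness_sum_final_change : List String × (List (String × Int)) :=
  (["dollar", "euro", "dollar"], [("dollar", 5), ("penny", 0), ("dime", 1)])

def Spec_sum_final_change (final_change : List String) (DENOMINATIONS_ : List (String × Int)) (out : List (String × Int)) : Prop := out = sum_final_change_alt final_change DENOMINATIONS_
instance (final_change : List String) (DENOMINATIONS_ : List (String × Int)) (out : List (String × Int)) : Decidable (Spec_sum_final_change final_change DENOMINATIONS_ out) := by unfold Spec_sum_final_change; infer_instance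

-- ===== CLAIM (what is proved, stated in full; the proofs are below) =====
def Claim_equal_sum_final_change : Prop := ∀ (final_change : List String) (DENOMINATIONS_ : List (String × Int)), Dom_sum_final_change final_change DENOMINATIONS_ → Pre_sum_final_change final_change DENOMINATIONS_ → Spec_sum_final_change final_change DENOMINATIONS_ (sum_final_change final_change DENOMINATIONS_)

-- ===== LEMMAS AND PROOFS =====

-- the bucket key A's if/elif chain routes an element to
def pvClassify (e : String) : String :=
  if e = "dollar" then "dollar"
  else if e = "quarter" then "quarter"
  else if e = "dime" then "dime"
  else if e = "nickel" then "nickel" else "penny"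

-- add g(key) to every entry's value
def pvAddF (g : String → Int) (d : List (String × Int)) : List (String × Int) :=
  d.map (fun p => (p.1, p.2 + g p.1))

lemma pvAddF_zero (d : List (String × Int)) : pvAddF (fun _ => 0) d = d := by
  simp [pvAddF]

lemma pvBump_if (d : List (String × Int)) (k : String) (n : Int) :
    (if n ≠ 0 then pvBump d k n else d) = pvBump d k n := by
  by_cases h : n = 0 <;> simp [h, pvBump]

lemma pvAddF_bump (g : String → Int) (d : List (String × Int)) (k : String) (n : Int) :
    pvAddF g (pvBump d k n) = pvAddF (fun x => g x + if x = k then n else 0) d := by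
  unfold pvAddF pvBump
  rw [List.map_map]
  apply List.map_congr_left
  intro p _
  by_cases h : p.1 = k <;> simp [Function.comp_def, h] <;> ring

lemma pvBump_addF (g : String → Int) (d : List (String × Int)) (k : String) (n : Int) :
    pvBump (pvAddF g d) k n = pvAddF (fun x => g x + if x = k then n else 0) d := by
  unfold pvAddF pvBump
  rw [List.map_map]
  apply List.map_congr_left
  intro p _
  by_cases h : p.1 = k <;> simp [Function.comp_def, h] <;> ring

lemma pvStepA_eq (d : List (String × Int)) (e : String) :
    pvStepA d e = pvBump d (pvClassify e) 1 := by
  unfold pvStepA pvClassify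
  split_ifs <;> rfl

-- A's loop adds, to every entry, the number of elements routed to its key
lemma sum_final_change_char (final_change : List String) (D : List (String × Int)) :
    sum_final_change final_change D
      = pvAddF (fun k => (final_change.countP (fun e => pvClassify e = k) : Int)) D := by
  induction final_change generalizing D with
  | nil => simp [sum_final_change, pvAddF]
  | cons e tl ih =>
      show List.foldl pvStepA D (e :: tl) = _
      rw [List.foldl_cons, pvStepA_eq,
        show List.foldl pvStepA (pvBump D (pvClassify e) 1) tl
            = sum_final_change tl (pvBump D (pvClassify e) 1) from rfl,
        ih, pvAddF_bump]
      unfold pvAddF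
      apply List.map_congr_left
      intro p _
      by_cases h : pvClassify e = p.1 <;>
        simp [List.countP_cons, h, eq_comm] <;> push_cast <;> ring

-- every element of final_change lands in exactly one of the four named buckets or 'penny'
lemma pv_length_split (fc : List String) :
    fc.length = fc.count "dollar" + fc.count "quarter" + fc.count "dime" + fc.count "nickel"
      + fc.countP (fun e => pvClassify e = "penny") := by
  induction fc with
  | nil => simp
  | cons e tl ih =>
      rw [List.length_cons, ih]
      simp only [List.count_cons, List.countP_cons, beq_iff_eq, decide_eq_true_eq]
      clear ih
      unfold pvClassify
      split_ifs <;> first | omega | simp_all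

lemma pv_countP_classify_eq_count (fc : List String) (k : String)
    (hk : k = "dollar" ∨ k = "quarter" ∨ k = "dime" ∨ k = "nickel") :
    fc.countP (fun e => pvClassify e = k) = fc.count k := by
  rw [List.count_eq_countP]
  apply List.countP_congr
  intro e _
  unfold pvClassify
  rcases hk with h | h | h | h <;> subst h <;> split_ifs <;> simp_all

lemma pv_classify_mem (e : String) :
    pvClassify e = "dollar" ∨ pvClassify e = "quarter" ∨ pvClassify e = "dime"
      ∨ pvClassify e = "nickel" ∨ pvClassify e = "penny" := by
  unfold pvClassify; split_ifs <;> simp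

-- ===== VERDICT (by name: the statement is the Claim_ definition above) =====
theorem sum_final_change_spec : Claim_equal_sum_final_change := by
  intro fc D _ _
  unfold Spec_sum_final_change sum_final_change_alt
  rw [PySem.Dict.foldl_insert_getD_add_one_eq_counter]
  simp only [PySem.Dict.getD_counter, pvBump_if]
  rw [sum_final_change_char]
  conv_rhs => rw [show D = pvAddF (fun _ => 0) D from (pvAddF_zero D).symm]
  simp only [pvBump_addF]
  unfold pvAddF
  apply List.map_congr_left
  intro p _
  have hsplit := pv_length_split fc
  refine congrArg (fun z => (p.1, p.2 + z)) ?_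
  by_cases h1 : p.1 = "dollar"
  · simp [h1, pv_countP_classify_eq_count fc "dollar" (by simp)]
  by_cases h2 : p.1 = "quarter"
  · simp [h2, pv_countP_classify_eq_count fc "quarter" (by simp)]
  by_cases h3 : p.1 = "dime"
  · simp [h3, pv_countP_classify_eq_count fc "dime" (by simp)]
  by_cases h4 : p.1 = "nickel"
  · simp [h4, pv_countP_classify_eq_count fc "nickel" (by simp)]
  by_cases h5 : p.1 = "penny"
  · rw [h5]
    simp
    push_cast at hsplit ⊢
    omega
  · have hz : fc.countP (fun e => pvClassify e = p.1) = 0 := by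
      apply List.countP_eq_zero.mpr
      intro e _
      simp only [decide_eq_true_eq]
      rcases pv_classify_mem e with h | h | h | h | h <;> rw [h] <;> intro he <;>
        first
          | exact h1 he.symm
          | exact h2 he.symm
          | exact h3 he.symm
          | exact h4 he.symm
          | exact h5 he.symm
    simp [h1, h2, h3, h4, h5, hz]
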